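-- pv_equiv track=rewrite | github.com/etherbeing/cveforge | core/compression/delta.py | counter_strike
-- ===== SOURCE A (Python) =====
-- from collections import Counter
-- from typing import Any, Literal, Optional, cast
--
-- def bits_to_number(array: list[int] | str):
--     return sum(map(lambda x: int(x[1]) * 2 ** x[0], enumerate(reversed(array))))
--
-- def counter_strike(array: list[int]):
--     counter = Counter(array)
--     commons = counter.most_common()
--     Zs = commons[0][0]
--     Os = commons[1][0]
--     # the rest of the numbers are going to take 0s as its value and therefore will be marked in a position matrix.
--     binary_array: list[Literal[1, 0]] = []
--     position_matrx: dict[int, list[int]] = {}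
--     for i, element in enumerate(array):
--         if element == Os:
--             binary_array.append(1)
--         else:
--             if element != Zs:
--                 if element not in position_matrx:
--                     position_matrx[element] = [i]
--                 else:
--                     position_matrx[element].append(i)
--             binary_array.append(0)
--     return bits_to_number(cast(list[int], binary_array)), position_matrx
-- ===== SOURCE B (Python) =====
-- from collections import Counter
-- from functools import reduce
--
-- def counter_strike(array):
--     commons = Counter(array).most_common()
--     Zs = commons[0][0]
--     Os = commons[1][0]
--     number = reduce(lambda acc, e: acc * 2 + (e == Os), array, 0)
--     positions = {}
--     for i, e in enumerate(array):
--         positions.setdefault(e, []).append(i)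
--     position_matrx = {k: v for k, v in positions.items() if k != Zs and k != Os}
--     return number, position_matrx
-- ===== Notes on version B (the rewrite author's own statement) =====
-- stated objective: faster
-- what changed: A runs one interleaved loop that builds a bit list (then sums bit * 2**i over the reversed enumeration, a fresh big-integer power per index) while conditionally inserting/appending into the position dict; B is three independent passes: a Horner-rule reduce for the number (no bit list, no powers), a setdefault pass that groups ALL indices by element, and a dict comprehension that filters the two most common keys out afterwards.
-- outside the precondition, e.g. on counter_strike([0]): A raises IndexError, B raises IndexError; on counter_strike([]): A raises IndexError, B raises IndexError; on counter_strike([1]): A raises IndexError, B raises IndexError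
import Mathlib
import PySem

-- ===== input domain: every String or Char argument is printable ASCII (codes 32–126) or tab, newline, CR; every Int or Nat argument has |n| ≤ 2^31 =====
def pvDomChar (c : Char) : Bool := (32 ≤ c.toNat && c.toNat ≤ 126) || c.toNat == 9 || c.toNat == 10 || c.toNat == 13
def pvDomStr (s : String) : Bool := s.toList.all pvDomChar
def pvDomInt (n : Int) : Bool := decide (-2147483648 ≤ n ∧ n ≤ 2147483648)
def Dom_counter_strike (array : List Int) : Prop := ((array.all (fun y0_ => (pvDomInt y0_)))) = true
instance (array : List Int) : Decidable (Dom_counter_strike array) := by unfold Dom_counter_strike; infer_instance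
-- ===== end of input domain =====

-- B replaces A's single loop that interleaves bit-list building (then a sum of 2**i over the
-- reversed list) with conditional dict insertion by three independent passes: a Horner-rule
-- reduce for the number, a group-ALL-indices dict pass, and a key-filtering dict comprehension.

-- ===== PORT A =====
-- enumerate indices are ≥ 0, so 2 ** x[0] is ported exactly as 2 ^ x.1.toNat
def bits_to_number (array : List Int) : Int :=
  ((PySem.List.enumerate array.reverse 0).map (fun x => x.2 * 2 ^ x.1.toNat)).sum

def counter_strike (array : List Int) : Int × (List (Int × List Int)) :=
  let counter : PySem.Dict Int Int := PySem.Dict.counter array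
  let commons := PySem.List.sorted counter.items (fun p => p.2) true
  -- commons[0] / commons[1]: IndexError (pyGet? = none) when there are < 2 distinct
  -- elements; those inputs are excluded by Pre_, the default (0,0) is never used there
  let Zs := ((PySem.List.pyGet? commons 0).getD (0, 0)).1
  let Os := ((PySem.List.pyGet? commons 1).getD (0, 0)).1
  let st := (PySem.List.enumerate array 0).foldl
    (fun (s : List Int × PySem.Dict Int (List Int)) p =>
      if p.2 == Os then
        (s.1 ++ [(1 : Int)], s.2)
      else
        (s.1 ++ [(0 : Int)],
          if p.2 != Zs then
            (if s.2.contains p.2 = false then s.2.insert p.2 [p.1]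
             else s.2.insert p.2 (s.2.getD p.2 [] ++ [p.1]))
          else s.2))
    ([], PySem.Dict.empty)
  (bits_to_number st.1, st.2.items)

-- ===== PORT B =====
def counter_strike_alt (array : List Int) : Int × (List (Int × List Int)) :=
  let commons := PySem.List.sorted (PySem.Dict.counter array : PySem.Dict Int Int).items (fun p => p.2) true
  let Zs := ((PySem.List.pyGet? commons 0).getD (0, 0)).1
  let Os := ((PySem.List.pyGet? commons 1).getD (0, 0)).1
  let number := array.foldl (fun acc e => acc * 2 + (if e == Os then 1 else 0)) 0
  -- positions.setdefault(e, []).append(i)  =  d[e] = d.get(e, []) + [i]  =  Dict.modify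
  let positions := (PySem.List.enumerate array 0).foldl
    (fun (d : PySem.Dict Int (List Int)) p => d.modify p.2 [] (fun v => v ++ [p.1]))
    PySem.Dict.empty
  let pm := PySem.Dict.ofList (positions.items.filter (fun kv => kv.1 != Zs && kv.1 != Os))
  (number, pm.items)

-- ===== PRECONDITION & SPEC =====
-- Pre_ excludes arrays with fewer than two distinct elements, on which Python A raises
-- IndexError at commons[1][0] (or commons[0][0] on the empty list).
def Pre_counter_strike (array : List Int) : Prop := ∃ a ∈ array, ∃ b ∈ array, a ≠ b
instance (array : List Int) : Decidable (Pre_counter_strike array) := by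
  unfold Pre_counter_strike; infer_instance
def pvWitness_counter_strike : List Int := [0, 1, 0]

def Spec_counter_strike (array : List Int) (out : Int × (List (Int × List Int))) : Prop := out = counter_strike_alt array
instance (array : List Int) (out : Int × (List (Int × List Int))) : Decidable (Spec_counter_strike array out) := by unfold Spec_counter_strike; infer_instance

-- ===== CLAIM (what is proved, stated in full; the proofs are below) =====
def Claim_equal_counter_strike : Prop := ∀ (array : List Int), Dom_counter_strike array → Pre_counter_strike array → Spec_counter_strike array (counter_strike array)

-- ===== LEMMAS AND PROOFS =====

-- proof-only name for A's loop body (definitionally the lambda in the port)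
def stepA (Zs Os : Int) (s : List Int × PySem.Dict Int (List Int)) (p : Int × Int) :
    List Int × PySem.Dict Int (List Int) :=
  if p.2 == Os then
    (s.1 ++ [(1 : Int)], s.2)
  else
    (s.1 ++ [(0 : Int)],
      if p.2 != Zs then
        (if s.2.contains p.2 = false then s.2.insert p.2 [p.1]
         else s.2.insert p.2 (s.2.getD p.2 [] ++ [p.1]))
      else s.2)

-- the grouping step shared (after the split) by both sides
def gstep (d : PySem.Dict Int (List Int)) (p : Int × Int) : PySem.Dict Int (List Int) :=
  d.modify p.2 [] (fun v => v ++ [p.1])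

def bitOf (Os e : Int) : Int := if e == Os then 1 else 0

-- A's conditional dict update IS the grouping step (on the elements it touches)
theorem stepA_dict (Zs Os : Int) (bs : List Int) (d : PySem.Dict Int (List Int))
    (p : Int × Int) (h1 : (p.2 == Os) = false) (h2 : (p.2 != Zs) = true) :
    (stepA Zs Os (bs, d) p).2 = gstep d p := by
  simp only [stepA, gstep, h1, h2, Bool.false_eq_true, if_false, if_true]
  cases hc : d.contains p.2 with
  | true => simp [PySem.Dict.modify]
  | false => simp [PySem.Dict.modify, PySem.Dict.getD_of_not_contains d ([] : List Int) hc]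

-- split A's interleaved loop: bit list = map, dict = grouping fold over the filtered pairs
theorem foldA_split (Zs Os : Int) (l : List (Int × Int)) :
    ∀ (bs : List Int) (d : PySem.Dict Int (List Int)),
      l.foldl (stepA Zs Os) (bs, d)
      = (bs ++ l.map (fun p => bitOf Os p.2),
         (l.filter (fun p => p.2 != Os && p.2 != Zs)).foldl gstep d) := by
  induction l with
  | nil => intro bs d; simp
  | cons p l ih =>
    intro bs d
    rw [List.foldl_cons, List.filter_cons]
    by_cases h1 : p.2 = Os
    · have hb : (p.2 == Os) = true := by simp [h1]
      have hA : stepA Zs Os (bs, d) p = (bs ++ [(1 : Int)], d) := by simp [stepA, hb]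
      rw [hA, ih]
      simp [bitOf, h1, List.append_assoc]
    · have hb : (p.2 == Os) = false := by simp [h1]
      by_cases h2 : p.2 = Zs
      · have hz : (p.2 != Zs) = false := by simp [h2]
        have hA : stepA Zs Os (bs, d) p = (bs ++ [(0 : Int)], d) := by
          simp [stepA, hb, hz]
        rw [hA, ih]
        simp [bitOf, hz, h1, List.append_assoc]
      · have hz : (p.2 != Zs) = true := by simp [h2]
        have hA : stepA Zs Os (bs, d) p = (bs ++ [(0 : Int)], gstep d p) := by
          have hd := stepA_dict Zs Os bs d p hb hz
          have h1' : (stepA Zs Os (bs, d) p).1 = bs ++ [(0 : Int)] := by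
            simp [stepA, hb]
          exact Prod.ext h1' hd
        rw [hA, ih]
        simp [bitOf, hz, h1, List.append_assoc]

-- bits_to_number over a cons: Horner link (number part)
theorem btn_cons (b : Int) (bs : List Int) :
    bits_to_number (b :: bs) = b * 2 ^ bs.length + bits_to_number bs := by
  simp [bits_to_number, PySem.List.enumerate_append, PySem.List.enumerate_cons,
    PySem.List.enumerate_nil]
  ring

theorem horner_eq (bs : List Int) : ∀ n : Int,
    bs.foldl (fun a b => a * 2 + b) n = n * 2 ^ bs.length + bits_to_number bs := by
  induction bs with
  | nil => intro n; simp [bits_to_number]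
  | cons b bs ih =>
    intro n
    rw [List.foldl_cons, ih, btn_cons]
    simp only [List.length_cons, pow_succ]
    ring

-- the grouping fold keyed by p.2 is the library's fold keyed by p.1, on the swapped pairs
theorem gfold_swap (l : List (Int × Int)) (d : PySem.Dict Int (List Int)) :
    l.foldl gstep d
    = (l.map Prod.swap).foldl (fun d p => d.modify p.1 [] (fun v => v ++ [p.2])) d := by
  rw [List.foldl_map]; rfl

theorem gfold_getD (l : List (Int × Int)) (c : Int) :
    (l.foldl gstep PySem.Dict.empty).getD c []
    = (l.filter (fun p => p.2 == c)).map (fun p => p.1) := by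
  rw [gfold_swap, PySem.Dict.getD_foldl_modify_append]
  simp [List.filter_map, Function.comp_def, Prod.swap]

theorem gfold_keys (l : List (Int × Int)) :
    (l.foldl gstep PySem.Dict.empty).keys = PySem.Set.ofList (l.map (fun p => p.2)) := by
  have h := PySem.Dict.keys_foldl_modify_key l (fun p => p.2) ([] : List Int)
    (fun _ p => fun v => v ++ [p.1]) PySem.Dict.empty
  simpa [PySem.Set.update_empty] using h

theorem gfold_nodup (l : List (Int × Int)) :
    (l.foldl gstep PySem.Dict.empty).keys.Nodup :=
  PySem.Dict.nodup_keys_foldl_modify_key l (fun p => p.2) ([] : List Int)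
    (fun _ p => fun v => v ++ [p.1]) PySem.Dict.empty (by simp)

theorem gfold_items (l : List (Int × Int)) :
    (l.foldl gstep PySem.Dict.empty).items
    = (PySem.Set.ofList (l.map (fun p => p.2))).map
        (fun k => (k, (l.filter (fun p => p.2 == k)).map (fun p => p.1))) := by
  rw [PySem.Dict.items_eq_map_keys _ (gfold_nodup l) ([] : List Int), gfold_keys]
  exact List.map_congr_left (fun k _ => by rw [gfold_getD])

-- first-occurrence dedup commutes with filtering
theorem ofList_filter (q : Int → Bool) (xs : List Int) :
    PySem.Set.ofList (xs.filter q) = (PySem.Set.ofList xs).filter q := by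
  induction xs using List.reverseRecOn with
  | nil => rfl
  | append_singleton xs x ih =>
    rw [PySem.Set.ofList_append_singleton]
    cases hq : q x with
    | false =>
      have hlf : List.filter q (xs ++ [x]) = List.filter q xs := by
        simp [List.filter_append, hq]
      rw [hlf, ih]
      by_cases hm : x ∈ PySem.Set.ofList xs
      · rw [PySem.Set.add_of_mem hm]
      · rw [PySem.Set.add_of_not_mem hm, List.filter_append]
        simp [hq]
    | true =>
      have hlf : List.filter q (xs ++ [x]) = List.filter q xs ++ [x] := by
        simp [List.filter_append, hq]
      rw [hlf, PySem.Set.ofList_append_singleton, ih]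
      by_cases hm : x ∈ xs
      · have hms : x ∈ PySem.Set.ofList xs := (PySem.Set.mem_ofList xs x).mpr hm
        have hmf : x ∈ (PySem.Set.ofList xs).filter q :=
          List.mem_filter.mpr ⟨hms, hq⟩
        rw [PySem.Set.add_of_mem hmf, PySem.Set.add_of_mem hms]
      · have hms : x ∉ PySem.Set.ofList xs := fun h => hm ((PySem.Set.mem_ofList xs x).mp h)
        have hmf : x ∉ (PySem.Set.ofList xs).filter q := fun h =>
          hms (List.mem_filter.mp h).1
        rw [PySem.Set.add_of_not_mem hmf, PySem.Set.add_of_not_mem hms, List.filter_append]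
        simp [hq]

-- B's dict comprehension re-lists the filtered items
theorem ofList_items (ps : List (Int × List Int)) (h : (ps.map Prod.fst).Nodup) :
    (PySem.Dict.ofList ps).items = ps := by
  have := PySem.Dict.items_foldl_insert_fresh ps Prod.fst Prod.snd PySem.Dict.empty
    (fun a _ => by simp) h
  simpa using this

-- both dict pipelines produce the same association list, for any Zs Os
theorem dict_eq (Zs Os : Int) (l : List (Int × Int)) :
    ((l.filter (fun p => p.2 != Os && p.2 != Zs)).foldl gstep PySem.Dict.empty).items
    = (PySem.Dict.ofList ((l.foldl gstep PySem.Dict.empty).items.filter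
        (fun kv => kv.1 != Zs && kv.1 != Os))).items := by
  have hq : ∀ e : Int, (e != Os && e != Zs) = (e != Zs && e != Os) := by
    intro e; rw [Bool.and_comm]
  -- right-hand side: filter the characterized items, pushing the filter onto the keys
  rw [gfold_items l, gfold_items]
  rw [List.filter_map (f := fun k => (k, (l.filter (fun p => p.2 == k)).map (fun p => p.1)))
      (p := fun kv => kv.1 != Zs && kv.1 != Os)]
  have hpred : List.filter ((fun kv : Int × List Int => kv.1 != Zs && kv.1 != Os) ∘
        (fun k => (k, (l.filter (fun p => p.2 == k)).map (fun p => p.1))))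
        (PySem.Set.ofList (l.map (fun p => p.2)))
      = List.filter (fun k => k != Zs && k != Os)
        (PySem.Set.ofList (l.map (fun p => p.2))) :=
    List.filter_congr (fun k _ => by simp)
  rw [hpred]
  have hmapfst :
      ((List.filter (fun k => k != Zs && k != Os) (PySem.Set.ofList (l.map (fun p => p.2)))).map
        (fun k => (k, (l.filter (fun p => p.2 == k)).map (fun p => p.1)))).map Prod.fst
      = List.filter (fun k => k != Zs && k != Os) (PySem.Set.ofList (l.map (fun p => p.2))) := by
    rw [List.map_map]; simp [Function.comp_def]
  rw [ofList_items _ (by rw [hmapfst]; exact (PySem.Set.nodup_ofList _).filter _)]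
  -- now both sides are maps over filtered first-occurrence key lists
  have hkeys : PySem.Set.ofList ((l.filter (fun p => p.2 != Os && p.2 != Zs)).map (fun p => p.2))
      = (PySem.Set.ofList (l.map (fun p => p.2))).filter (fun k => k != Zs && k != Os) := by
    have hswap : (l.filter (fun p => p.2 != Os && p.2 != Zs)).map (fun p => p.2)
        = (l.map (fun p => p.2)).filter (fun e => e != Zs && e != Os) := by
      rw [List.filter_map]
      exact congrArg (List.map _) (List.filter_congr (fun p _ => by
        simpa [Function.comp_def] using hq p.2))
    rw [hswap, ofList_filter]
  rw [hkeys]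
  refine List.map_congr_left (fun k hk => ?_)
  have hkq : (k != Zs && k != Os) = true := (List.mem_filter.mp hk).2
  congr 1
  rw [List.filter_filter]
  refine congrArg _ (List.filter_congr (fun p _ => ?_))
  cases hpk : (p.2 == k) with
  | false => simp
  | true =>
    have hp2 : p.2 = k := by simpa using hpk
    rw [hp2, hq k, hkq]
    simp

-- ===== VERDICT (by name: the statement is the Claim_ definition above) =====
theorem counter_strike_spec : Claim_equal_counter_strike := by
  intro array _ _
  unfold Spec_counter_strike counter_strike counter_strike_alt
  set commons := PySem.List.sorted (PySem.Dict.counter array : PySem.Dict Int Int).items (fun p => p.2) true with hc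
  set Zs := ((PySem.List.pyGet? commons 0).getD (0, 0)).1 with hz
  set Os := ((PySem.List.pyGet? commons 1).getD (0, 0)).1 with ho
  have hsplit := foldA_split Zs Os (PySem.List.enumerate array 0) [] PySem.Dict.empty
  refine Prod.ext ?_ ?_
  · -- number component
    show bits_to_number ((PySem.List.enumerate array 0).foldl (stepA Zs Os)
        ([], PySem.Dict.empty)).1 = _
    rw [hsplit]
    have hbits : (PySem.List.enumerate array 0).map (fun p => bitOf Os p.2)
        = array.map (fun e => bitOf Os e) := by
      conv_rhs => rw [← PySem.List.map_snd_enumerate array 0]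
      rw [List.map_map]
      simp [Function.comp_def]
    have hh := horner_eq (array.map (fun e => bitOf Os e)) 0
    rw [List.foldl_map] at hh
    simp only [List.nil_append, hbits]
    simp only [zero_mul, zero_add] at hh
    exact (hh.symm.trans (by rfl))
  · -- dict component
    show (((PySem.List.enumerate array 0).foldl (stepA Zs Os)
        ([], PySem.Dict.empty)).2).items = _
    rw [hsplit]
    exact dict_eq Zs Os (PySem.List.enumerate array 0)
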